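-- pv_equiv track=rewrite | github.com/codalife/challenge | numInCell.py | answer
-- ===== SOURCE A (Python) =====
-- def answer(x, y):
--     res = 0
--     a = 1
--     b = 0
--
--     while (a <= x):
--         res += a
--         a += 1
--     a -= 1
--
--     while (b < y-1):
--         res += (a+b)
--         b += 1
--
--     return res
-- ===== SOURCE B (Python) =====
-- def answer(x, y):
--     t = x * (x + 1) // 2 if x >= 1 else 0
--     a = x if x >= 1 else 0
--     m = y - 1 if y >= 1 else 0
--     return t + a * m + m * (m - 1) // 2
-- ===== Notes on version B (the rewrite author's own statement) =====
-- stated objective: faster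
-- what changed: replaces both accumulation while-loops by closed-form arithmetic-series formulas
import Mathlib
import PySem

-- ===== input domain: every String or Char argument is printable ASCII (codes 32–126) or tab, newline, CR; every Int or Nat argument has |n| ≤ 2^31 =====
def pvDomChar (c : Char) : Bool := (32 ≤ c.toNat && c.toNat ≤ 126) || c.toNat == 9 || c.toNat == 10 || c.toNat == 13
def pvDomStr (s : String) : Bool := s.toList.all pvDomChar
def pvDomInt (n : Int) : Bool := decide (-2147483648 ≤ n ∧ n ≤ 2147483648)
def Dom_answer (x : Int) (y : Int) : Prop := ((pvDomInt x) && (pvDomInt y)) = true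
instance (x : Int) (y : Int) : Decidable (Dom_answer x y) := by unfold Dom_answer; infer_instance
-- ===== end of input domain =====

-- B replaces A's two accumulation while-loops by closed-form arithmetic-series formulas (objective: faster).

-- ===== PORT A =====
-- first while loop: while a <= x: res += a; a += 1; returns (res, a)
def answerLoop1 (x : Int) (a : Int) (res : Int) : Int × Int :=
  if a ≤ x then answerLoop1 x (a + 1) (res + a) else (res, a)
termination_by (x + 1 - a).toNat
decreasing_by omega

-- second while loop: while b < y-1: res += (a+b); b += 1; returns res
def answerLoop2 (y : Int) (a : Int) (b : Int) (res : Int) : Int :=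
  if b < y - 1 then answerLoop2 y a (b + 1) (res + (a + b)) else res
termination_by (y - 1 - b).toNat
decreasing_by omega

def answer (x : Int) (y : Int) : Int :=
  let p := answerLoop1 x 1 0
  let res := p.1
  let a := p.2 - 1
  answerLoop2 y a 0 res

-- ===== PORT B =====
def answer_alt (x : Int) (y : Int) : Int :=
  let t : Int := if x ≥ 1 then PySem.Int.floordiv (x * (x + 1)) 2 else 0
  let a : Int := if x ≥ 1 then x else 0
  let m : Int := if y ≥ 1 then y - 1 else 0
  t + a * m + PySem.Int.floordiv (m * (m - 1)) 2

-- ===== PRECONDITION & SPEC =====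
def Spec_answer (x : Int) (y : Int) (out : Int) : Prop := out = answer_alt x y
instance (x : Int) (y : Int) (out : Int) : Decidable (Spec_answer x y out) := by unfold Spec_answer; infer_instance

-- ===== CLAIM (what is proved, stated in full; the proofs are below) =====
def Claim_equal_answer : Prop := ∀ (x : Int) (y : Int), Dom_answer x y → Spec_answer x y (answer x y)

-- ===== LEMMAS AND PROOFS =====

theorem loop1_closed (x a res : Int) :
    answerLoop1 x a res =
      (res + (if a ≤ x then (x * (x + 1) - a * (a - 1)) / 2 else 0),
       if a ≤ x then x + 1 else a) := by
  fun_induction answerLoop1 x a res with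
  | case1 a res h ih =>
    rw [ih]
    by_cases h2 : a + 1 ≤ x
    · have he : (2 : Int) ∣ x * (x + 1) - (a + 1) * ((a + 1) - 1) := by
        rcases Int.even_mul_succ_self x with ⟨k, hk⟩
        rcases Int.even_mul_succ_self a with ⟨m, hm⟩
        refine ⟨k - m, ?_⟩
        have h3 : (a + 1) * ((a + 1) - 1) = a * (a + 1) := by ring
        rw [h3]; omega
      have he2 : (2 : Int) ∣ x * (x + 1) - a * (a - 1) := by
        rcases Int.even_mul_succ_self x with ⟨k, hk⟩
        rcases Int.even_mul_succ_self (a - 1) with ⟨m, hm2⟩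
        have hm : a * (a - 1) = (a - 1) * ((a - 1) + 1) := by ring
        refine ⟨k - m, ?_⟩; omega
      have hrel : x * (x + 1) - a * (a - 1) = (x * (x + 1) - (a + 1) * ((a + 1) - 1)) + 2 * a := by
        ring
      rw [if_pos h2, if_pos h2, if_pos h, if_pos h]
      refine Prod.ext ?_ rfl
      simp only
      omega
    · have hax : a = x := by omega
      subst hax
      rw [if_neg h2, if_neg h2, if_pos h, if_pos h]
      have hval : a * (a + 1) - a * (a - 1) = 2 * a := by ring
      refine Prod.ext (by simp only; omega) rfl
  | case2 a res h =>
    rw [if_neg h, if_neg h]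
    simp

theorem loop2_closed (y a b res : Int) :
    answerLoop2 y a b res =
      res + (if b < y - 1 then a * (y - 1 - b) + ((y - 2) * (y - 1) - b * (b - 1)) / 2 else 0) := by
  fun_induction answerLoop2 y a b res with
  | case1 b res h ih =>
    rw [ih]
    by_cases h2 : b + 1 < y - 1
    · have he : (2 : Int) ∣ (y - 2) * (y - 1) - (b + 1) * ((b + 1) - 1) := by
        have h1 : (y - 2) * (y - 1) = (y - 2) * ((y - 2) + 1) := by ring
        rcases Int.even_mul_succ_self (y - 2) with ⟨k, hk⟩
        have h3 : (b + 1) * ((b + 1) - 1) = b * (b + 1) := by ring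
        rcases Int.even_mul_succ_self b with ⟨m, hm⟩
        refine ⟨k - m, ?_⟩
        omega
      have hrel : (y - 2) * (y - 1) - b * (b - 1) =
          ((y - 2) * (y - 1) - (b + 1) * ((b + 1) - 1)) + 2 * b := by ring
      have ha : a * (y - 1 - b) = a * (y - 1 - (b + 1)) + a := by ring
      rw [if_pos h2, if_pos h]
      omega
    · have hb : b = y - 2 := by omega
      rw [if_neg h2, if_pos h]
      have hval : (y - 2) * (y - 1) - b * (b - 1) = 2 * b + a * 0 := by rw [hb]; ring
      have hm : a * (y - 1 - b) = a := by rw [hb]; ring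
      omega
  | case2 b res h =>
    rw [if_neg h]
    simp

-- ===== VERDICT (by name: the statement is the Claim_ definition above) =====
theorem answer_spec : Claim_equal_answer := by
  intro x y _
  unfold Spec_answer answer answer_alt
  rw [loop1_closed, loop2_closed]
  simp only [ge_iff_le, PySem.Int.floordiv_eq_ediv_of_pos (by norm_num : (0:Int) < 2)]
  have e1 : x * (x + 1) - 1 * (1 - 1) = x * (x + 1) := by ring
  have e2 : (y - 2) * (y - 1) - (0 : Int) * (0 - 1) = (y - 1) * (y - 1 - 1) := by ring
  by_cases hx : 1 ≤ x
  · by_cases hy2 : (0 : Int) < y - 1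
    · simp only [if_pos hx, if_pos hy2, if_pos (show (1:Int) ≤ y by omega)]
      have e3 : (x + 1 - 1) * (y - 1 - 0) = x * (y - 1) := by ring
      rw [e1, e2, e3]
      omega
    · by_cases hy : 1 ≤ y
      · have hy1 : y = 1 := by omega
        subst hy1
        simp only [if_pos hx, if_neg hy2, if_pos (le_refl (1:Int))]
        rw [e1]
        norm_num
      · simp only [if_pos hx, if_neg hy2, if_neg hy]
        rw [e1]
        norm_num
  · by_cases hy2 : (0 : Int) < y - 1
    · simp only [if_neg hx, if_pos hy2, if_pos (show (1:Int) ≤ y by omega)]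
      have e3 : (1 - 1 : Int) * (y - 1 - 0) = 0 := by ring
      rw [e2, e3]
      omega
    · by_cases hy : 1 ≤ y
      · have hy1 : y = 1 := by omega
        subst hy1
        simp only [if_neg hx, if_neg hy2, if_pos (le_refl (1:Int))]
        norm_num
      · simp only [if_neg hx, if_neg hy2, if_neg hy]
        norm_num
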